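-- pv_equiv track=rewrite | github.com/ity-soni/HashTable-Demo-App | hash.py | populate_hashtable_linear_probe
-- ===== SOURCE A (Python) =====
-- def hash_function(key):
--     """
--     Function takes a key value and returns a hash code value for that key.
--     Parameters:
--         key: str
--     Returns:
--         ReturnValue: int
--         Return value is the hash code of the function
--     """
--     h = 0
--     key = key.lower()
--     for a in key:
--         h = ((h * ord(a))) % 2147 + ord(a)
--         # Dividing to stop the hash code from going excessively
--         # and arbritrary large
--         # Dividing by a prime to evenly space the hash code distributions
--         # Interesting fact: 2147483647 is the 8th Mersenne Prime.
--         # hash code is returned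
--     return h
--
-- def populate_hashtable_linear_probe(tups, required_ht):
--     """
--     Function takes a list of tuples (of two strings, books and authors),
--     and buckets to populate a hashtable
--     Parameters:
--         list_of_tups: list[tup[str,str]]
--         buckets: int
--     ReturnValue:
--         required_ht: list[list[str,str]]
--     ReturnValue is the populated hashtable of list of lists
--     """
--     buckets=len(required_ht)
--     book = tups[0]
--     author = tups[1]
--     hashcode_book = hash_function(book)
--     bucket_book = hashcode_book % buckets
--     if required_ht[bucket_book]==[]:
--         required_ht[bucket_book].append(tups)
--     else:
--         idx=bucket_book+1
--         tmp_tbl=required_ht[idx:]+required_ht[:idx]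
--         for next_free in range(len(required_ht)):
--             if tmp_tbl[next_free]==[]:
--                 tmp_tbl[next_free].append(tups)
--                 required_ht=tmp_tbl[-(idx):]+tmp_tbl[:-(idx)]
--                 break
--     return required_ht
-- ===== SOURCE B (Python) =====
-- def hash_function(key):
--     h = 0
--     key = key.lower()
--     for a in key:
--         h = ((h * ord(a))) % 2147 + ord(a)
--     return h
--
-- def populate_hashtable_linear_probe(tups, required_ht):
--     # Direct modular linear probe: walk buckets (home+k) % n and append into the
--     # first empty one in place -- no rotated copies of the table are ever built.
--     n = len(required_ht)
--     b = hash_function(tups[0]) % n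
--     for k in range(n):
--         i = (b + k) % n
--         if required_ht[i] == []:
--             required_ht[i].append(tups)
--             return required_ht
--     return required_ht
-- ===== Notes on version B (the rewrite author's own statement) =====
-- stated objective: alternative
-- what changed: A rotates the whole table into a temporary copy, scans that copy for an empty bucket and rotates the result back; B walks buckets (home+k) % n directly and appends into the first empty one in place, never building rotated copies.
-- outside the precondition, e.g. on populate_hashtable_linear_probe(('abc', 'me'), []): A raises ZeroDivisionError, B raises ZeroDivisionError
import Mathlib
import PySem

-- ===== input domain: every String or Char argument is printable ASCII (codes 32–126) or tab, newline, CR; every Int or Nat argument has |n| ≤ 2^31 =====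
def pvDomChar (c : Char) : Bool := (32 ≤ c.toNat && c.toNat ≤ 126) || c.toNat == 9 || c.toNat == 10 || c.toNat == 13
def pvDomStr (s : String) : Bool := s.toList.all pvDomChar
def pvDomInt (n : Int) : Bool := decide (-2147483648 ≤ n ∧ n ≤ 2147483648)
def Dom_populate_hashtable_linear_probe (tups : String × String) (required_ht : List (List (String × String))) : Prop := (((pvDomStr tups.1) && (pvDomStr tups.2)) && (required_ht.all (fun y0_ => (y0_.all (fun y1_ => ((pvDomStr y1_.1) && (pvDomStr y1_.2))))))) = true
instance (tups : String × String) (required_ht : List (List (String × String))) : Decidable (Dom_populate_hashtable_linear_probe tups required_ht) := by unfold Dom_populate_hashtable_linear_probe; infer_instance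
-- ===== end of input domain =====

-- B replaces A's two rotated copies of the table with a direct in-place modular
-- scan from the home bucket (objective: alternative algorithm, no rotated copies).
-- Both Pythons mutate the found bucket's inner list in place; A additionally
-- rebuilds the outer list on collision while B returns the same outer list
-- object -- the equivalence proved here is about the RETURN value.

-- ===== PORT A =====
-- hash_function (identical helper in both Source A and Source B); ord a = code point
def pv_hash (key : String) : Int :=
  (PySem.Str.lower key).toList.foldl
    (fun h a => PySem.Int.mod (h * (a.toNat : Int)) 2147 + (a.toNat : Int)) 0

-- the 'for next_free in range(len(required_ht))' loop of A's else-branch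
def pvProbeA (tups : String × String) (idx : Int) (tmp ht : List (List (String × String))) : List Nat → List (List (String × String))
  | [] => ht
  | j :: rest =>
    if (PySem.List.pyGet? tmp (j : Int)).getD [] == [] then
      let tmp2 := tmp.set j (((PySem.List.pyGet? tmp (j : Int)).getD []) ++ [tups])
      PySem.List.slice tmp2 (some (-idx)) none ++ PySem.List.slice tmp2 none (some (-idx))
    else pvProbeA tups idx tmp ht rest

def populate_hashtable_linear_probe (tups : String × String) (required_ht : List (List (String × String))) : List (List (String × String)) :=
  let buckets : Int := (required_ht.length : Int)
  let book := tups.1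
  let hashcode_book := pv_hash book
  let bucket_book := PySem.Int.mod hashcode_book buckets
  if (PySem.List.pyGet? required_ht bucket_book).getD [] == [] then
    -- required_ht[bucket_book].append(tups): index is nonneg under Pre_, .toNat exact
    required_ht.set bucket_book.toNat (((PySem.List.pyGet? required_ht bucket_book).getD []) ++ [tups])
  else
    let idx := bucket_book + 1
    let tmp_tbl := PySem.List.slice required_ht (some idx) none ++ PySem.List.slice required_ht none (some idx)
    pvProbeA tups idx tmp_tbl required_ht (List.range required_ht.length)

-- ===== PORT B =====
-- the 'for k in range(n)' loop of B
def pvProbeB (tups : String × String) (ht : List (List (String × String))) (b : Int) : List Nat → List (List (String × String))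
  | [] => ht
  | k :: rest =>
    let i := PySem.Int.mod (b + (k : Int)) (ht.length : Int)
    if (PySem.List.pyGet? ht i).getD [] == [] then
      -- required_ht[i].append(tups): i is nonneg (Nat mod), .toNat exact
      ht.set i.toNat (((PySem.List.pyGet? ht i).getD []) ++ [tups])
    else pvProbeB tups ht b rest

def populate_hashtable_linear_probe_alt (tups : String × String) (required_ht : List (List (String × String))) : List (List (String × String)) :=
  let n : Int := (required_ht.length : Int)
  let b := PySem.Int.mod (pv_hash tups.1) n
  pvProbeB tups required_ht b (List.range required_ht.length)

-- ===== PRECONDITION & SPEC =====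
-- Pre_ excludes only the empty table, on which A raises ZeroDivisionError (hash % 0).
def Pre_populate_hashtable_linear_probe (tups : String × String) (required_ht : List (List (String × String))) : Prop := required_ht ≠ []
instance (tups : String × String) (required_ht : List (List (String × String))) : Decidable (Pre_populate_hashtable_linear_probe tups required_ht) := by unfold Pre_populate_hashtable_linear_probe; infer_instance

def pvWitness_populate_hashtable_linear_probe : (String × String) × (List (List (String × String))) := (("abc", "me"), [[("x", "y")], [], []])

def Spec_populate_hashtable_linear_probe (tups : String × String) (required_ht : List (List (String × String))) (out : List (List (String × String))) : Prop := out = populate_hashtable_linear_probe_alt tups required_ht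
instance (tups : String × String) (required_ht : List (List (String × String))) (out : List (List (String × String))) : Decidable (Spec_populate_hashtable_linear_probe tups required_ht out) := by unfold Spec_populate_hashtable_linear_probe; infer_instance

-- ===== CLAIM (what is proved, stated in full; the proofs are below) =====
def Claim_equal_populate_hashtable_linear_probe : Prop := ∀ (tups : String × String) (required_ht : List (List (String × String))), Dom_populate_hashtable_linear_probe tups required_ht → Pre_populate_hashtable_linear_probe tups required_ht → Spec_populate_hashtable_linear_probe tups required_ht (populate_hashtable_linear_probe tups required_ht)

-- ===== LEMMAS AND PROOFS =====

-- element j of the rotated table is element (s+j) mod n of the original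
theorem pv_rot_get {α : Type} (xs : List α) (s j : Nat) (hs : s ≤ xs.length)
    (hj : j < xs.length) :
    (xs.drop s ++ xs.take s)[j]? = xs[(s + j) % xs.length]? := by
  rcases Nat.lt_or_ge j (xs.length - s) with h | h
  · rw [List.getElem?_append_left (by simp; omega), List.getElem?_drop,
        Nat.mod_eq_of_lt (by omega)]
  · rw [List.getElem?_append_right (by simp; omega), List.length_drop,
        List.getElem?_take_of_lt (by omega)]
    congr 1
    rw [Nat.mod_eq_sub_mod (by omega), Nat.mod_eq_of_lt (by omega)]
    omega

-- rotating back the rotated table with one slot overwritten = setting the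
-- corresponding modular slot of the original
theorem pv_set_split_left {α : Type} (xs : List α) (s i : Nat) (v : α)
    (hi : i < s) (hs : s ≤ xs.length) :
    xs.set i v = (xs.take s).set i v ++ xs.drop s := by
  conv_lhs => rw [← List.take_append_drop s xs]
  rw [List.set_append, if_pos (by rw [List.length_take]; omega)]

theorem pv_set_split_right {α : Type} (xs : List α) (s i : Nat) (v : α)
    (hi : s ≤ i) (hs : s ≤ xs.length) :
    xs.set i v = xs.take s ++ (xs.drop s).set (i - s) v := by
  conv_lhs => rw [← List.take_append_drop s xs]
  rw [List.set_append, if_neg (by rw [List.length_take]; omega), List.length_take]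
  congr 3
  omega

-- rotating back the rotated table with one slot overwritten = setting the
-- corresponding modular slot of the original
theorem pv_unrot_set {α : Type} (xs : List α) (s j : Nat) (v : α)
    (hs1 : 1 ≤ s) (hs : s ≤ xs.length) (hj : j < xs.length) :
    (((xs.drop s ++ xs.take s).set j v).drop (xs.length - s)) ++
      (((xs.drop s ++ xs.take s).set j v).take (xs.length - s)) =
    xs.set ((s + j) % xs.length) v := by
  have hdl : (List.drop s xs).length = xs.length - s := by simp
  rcases Nat.lt_or_ge j (xs.length - s) with h | h
  · -- set lands in the drop part
    rw [List.set_append, if_pos (by rw [hdl]; omega)]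
    have e1 : ((xs.drop s).set j v ++ xs.take s).drop (xs.length - s) = xs.take s := by
      rw [List.drop_append_of_le_length (by simp)]
      simp
    have e2 : ((xs.drop s).set j v ++ xs.take s).take (xs.length - s) = (xs.drop s).set j v := by
      rw [List.take_append_of_le_length (by simp)]
      exact List.take_of_length_le (by simp)
    rw [e1, e2, Nat.mod_eq_of_lt (by omega),
        pv_set_split_right xs s (s + j) v (by omega) hs]
    have hj' : s + j - s = j := by omega
    rw [hj']
  · -- set lands in the take part
    rw [List.set_append, if_neg (by rw [hdl]; omega), hdl]
    have e1 : (xs.drop s ++ (xs.take s).set (j - (xs.length - s)) v).drop (xs.length - s) =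
        (xs.take s).set (j - (xs.length - s)) v := by
      rw [List.drop_append_of_le_length (by simp)]
      simp
      omega
    have e2 : (xs.drop s ++ (xs.take s).set (j - (xs.length - s)) v).take (xs.length - s) =
        xs.drop s := by
      rw [List.take_append_of_le_length (by simp)]
      exact List.take_of_length_le (by simp)
    have hmod : (s + j) % xs.length = j - (xs.length - s) := by
      rw [Nat.mod_eq_sub_mod (by omega), Nat.mod_eq_of_lt (by omega)]
      omega
    rw [e1, e2, hmod, pv_set_split_left xs s (j - (xs.length - s)) v (by omega) hs]

-- the core loop correspondence in A's else-branch
theorem pv_probe_core (tups : String × String) (ht : List (List (String × String)))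
    (B : Nat) (hB : B < ht.length) (hne : ¬ ht[B] = []) :
    ∀ d j, j + d + 1 = ht.length →
      pvProbeA tups ((B : Int) + 1) (ht.drop (B + 1) ++ ht.take (B + 1)) ht (List.range' j (d + 1)) =
      pvProbeB tups ht (B : Int) (List.range' (j + 1) d) := by
  have hsle : B + 1 ≤ ht.length := by omega
  intro d
  induction d with
  | zero =>
    intro j hj
    rw [show List.range' j (0 + 1) = [j] from List.range'_one,
        show List.range' (j + 1) 0 = ([] : List Nat) from List.range'_zero]
    have hget : PySem.List.pyGet? (ht.drop (B + 1) ++ ht.take (B + 1)) ((j : Nat) : Int)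
        = some ht[B] := by
      rw [PySem.List.pyGet?_natCast, pv_rot_get ht (B + 1) j hsle (by omega)]
      have hB' : (B + 1 + j) % ht.length = B := by
        rw [Nat.mod_eq_sub_mod (by omega), Nat.mod_eq_of_lt (by omega)]
        omega
      rw [hB', List.getElem?_eq_getElem hB]
      rfl
    simp only [pvProbeA, pvProbeB, hget, Option.getD_some]
    rw [if_neg (by simpa using hne)]
  | succ d ih =>
    intro j hj
    have hjn : j < ht.length := by omega
    have hmod_lt : (B + 1 + j) % ht.length < ht.length := Nat.mod_lt _ (by omega)
    have hgetA : PySem.List.pyGet? (ht.drop (B + 1) ++ ht.take (B + 1)) ((j : Nat) : Int)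
        = some ht[(B + 1 + j) % ht.length] := by
      rw [PySem.List.pyGet?_natCast, pv_rot_get ht (B + 1) j hsle hjn,
          List.getElem?_eq_getElem hmod_lt]
    have hiB : PySem.Int.mod ((B : Int) + ((j + 1 : Nat) : Int)) ((ht.length : Nat) : Int)
        = (((B + 1 + j) % ht.length : Nat) : Int) := by
      rw [show (B : Int) + ((j + 1 : Nat) : Int) = ((B + 1 + j : Nat) : Int) by push_cast; ring,
          PySem.Int.mod_natCast]
    have hgetB : PySem.List.pyGet? ht ((((B + 1 + j) % ht.length : Nat)) : Int)
        = some ht[(B + 1 + j) % ht.length] := by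
      rw [PySem.List.pyGet?_natCast, List.getElem?_eq_getElem hmod_lt]
    rw [List.range'_succ]
    simp only [pvProbeA, hgetA, Option.getD_some]
    by_cases hcase : ht[(B + 1 + j) % ht.length] = []
    · rw [if_pos (by simpa using hcase)]
      conv_rhs => rw [List.range'_succ]
      simp only [pvProbeB, hiB, hgetB, Option.getD_some]
      rw [if_pos (by simpa using hcase)]
      have hAres :
          PySem.List.slice ((ht.drop (B + 1) ++ ht.take (B + 1)).set j (ht[(B + 1 + j) % ht.length] ++ [tups])) (some (-((B : Int) + 1))) none ++
          PySem.List.slice ((ht.drop (B + 1) ++ ht.take (B + 1)).set j (ht[(B + 1 + j) % ht.length] ++ [tups])) none (some (-((B : Int) + 1))) =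
          ht.set ((B + 1 + j) % ht.length) (ht[(B + 1 + j) % ht.length] ++ [tups]) := by
        have hlen2 : ((ht.drop (B + 1) ++ ht.take (B + 1)).set j (ht[(B + 1 + j) % ht.length] ++ [tups])).length = ht.length := by
          simp
          omega
        rw [show -((B : Int) + 1) = -(((B + 1 : Nat)) : Int) by push_cast; ring,
            PySem.List.slice_from_neg_natCast _ _ (by omega),
            PySem.List.slice_to_neg_natCast _ _ (by omega), hlen2]
        exact pv_unrot_set ht (B + 1) j _ (by omega) hsle hjn
      rw [hAres, Int.toNat_natCast]

    · rw [if_neg (by simpa using hcase)]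
      conv_rhs => rw [List.range'_succ]
      simp only [pvProbeB, hiB, hgetB, Option.getD_some]
      rw [if_neg (by simpa using hcase)]
      exact ih (j + 1) (by omega)

-- ===== VERDICT (by name: the statement is the Claim_ definition above) =====
theorem populate_hashtable_linear_probe_spec : Claim_equal_populate_hashtable_linear_probe := by
  intro tups ht _ hpre
  unfold Spec_populate_hashtable_linear_probe
  have hn0 : 0 < ht.length := List.length_pos_iff.mpr hpre
  have hnI : (0 : Int) < (ht.length : Int) := by exact_mod_cast hn0
  have hb0 : 0 ≤ PySem.Int.mod (pv_hash tups.1) (ht.length : Int) :=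
    PySem.Int.mod_nonneg _ hnI
  have hbn : PySem.Int.mod (pv_hash tups.1) (ht.length : Int) < (ht.length : Int) :=
    PySem.Int.mod_lt _ hnI
  have hBcast : PySem.Int.mod (pv_hash tups.1) (ht.length : Int)
      = (((PySem.Int.mod (pv_hash tups.1) (ht.length : Int)).toNat : Nat) : Int) :=
    (Int.toNat_of_nonneg hb0).symm
  generalize hBdef : (PySem.Int.mod (pv_hash tups.1) (ht.length : Int)).toNat = B at hBcast
  have hBn : B < ht.length := by omega
  have hget : PySem.List.pyGet? ht (PySem.Int.mod (pv_hash tups.1) (ht.length : Int))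
      = some ht[B] := by
    rw [hBcast, PySem.List.pyGet?_natCast, List.getElem?_eq_getElem hBn]
  have hrange : List.range ht.length = 0 :: List.range' 1 (ht.length - 1) := by
    obtain ⟨m, hm⟩ : ∃ m, ht.length = m + 1 := ⟨ht.length - 1, by omega⟩
    rw [hm]
    simp [List.range_eq_range', List.range'_succ]
  have hi0 : PySem.Int.mod (PySem.Int.mod (pv_hash tups.1) (ht.length : Int) + ((0 : Nat) : Int))
      ((ht.length : Nat) : Int) = PySem.Int.mod (pv_hash tups.1) (ht.length : Int) := by
    simp only [Nat.cast_zero, add_zero]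
    rw [PySem.Int.mod_eq_emod_of_pos hnI, Int.emod_eq_of_lt hb0 hbn]
  unfold populate_hashtable_linear_probe populate_hashtable_linear_probe_alt
  rw [hrange]
  simp only [pvProbeB, hget, hi0, Option.getD_some]
  by_cases hcase : ht[B] = []
  · rw [if_pos (by simpa using hcase), if_pos (by simpa using hcase)]
  · rw [if_neg (by simpa using hcase), if_neg (by simpa using hcase)]
    rw [hBcast]
    have htmp : PySem.List.slice ht (some (((B : Nat) : Int) + 1)) none ++
        PySem.List.slice ht none (some (((B : Nat) : Int) + 1)) =
        ht.drop (B + 1) ++ ht.take (B + 1) := by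
      rw [show ((B : Int) + 1) = ((B + 1 : Nat) : Int) by push_cast; ring,
          PySem.List.slice_from_natCast, PySem.List.slice_to_natCast]
    rw [htmp]
    have hcore := pv_probe_core tups ht B hBn hcase (ht.length - 1) 0 (by omega)
    simpa [List.range'_succ] using hcore
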